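-- pv_equiv track=rewrite | github.com/J0FR/Maratones-de-Programacion-2023-2 | 1-S3-C.py | wow_factor
-- ===== SOURCE A (Python) =====
-- def wow_factor(s):
--     total = 0
--     s_size = len(s)
--     pref = [0] * s_size
--     suff = [0] * s_size
--
--     for i in range(1, s_size):
--         suff[i] = suff[i-1]
--         if s[i] == 'v' and s[i-1] == 'v':
--             suff[i] += 1
--
--     for i in range(s_size-2, -1, -1):
--         pref[i] = pref[i+1]
--         if s[i] == 'v' and s[i+1] == 'v':
--             pref[i] += 1
--
--     for i in range(s_size):
--         if s[i] == 'o' and suff[i] and pref[i]: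
--             total += (suff[i] * pref[i])
--
--     return total
-- ===== SOURCE B (Python) =====
-- def wow_factor(s):
--     # single-pass subsequence DP: count (vv, o, vv) triples directly,
--     # no precomputed total and no per-'o' product of left/right counts
--     ans = 0
--     pair_o = 0   # number of (vv-pair, later 'o') combinations seen so far
--     pairs = 0    # number of 'vv' pairs seen so far
--     prev = ''
--     for c in s:
--         if c == 'v' and prev == 'v':
--             ans += pair_o
--             pairs += 1
--         elif c == 'o':
--             pair_o += pairs
--         prev = c
--     return ans
-- ===== Notes on version B (the rewrite author's own statement) =====
-- stated objective: faster
-- what changed: Replaces A's three staged loops (build prefix and suffix vv-pair arrays, then sum left*right over every letter o) by a single-pass subsequence dynamic program counting (vv, o, vv) triples directly with three running counters, avoiding the two O(n) arrays and all indexed accesses.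
import Mathlib
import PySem

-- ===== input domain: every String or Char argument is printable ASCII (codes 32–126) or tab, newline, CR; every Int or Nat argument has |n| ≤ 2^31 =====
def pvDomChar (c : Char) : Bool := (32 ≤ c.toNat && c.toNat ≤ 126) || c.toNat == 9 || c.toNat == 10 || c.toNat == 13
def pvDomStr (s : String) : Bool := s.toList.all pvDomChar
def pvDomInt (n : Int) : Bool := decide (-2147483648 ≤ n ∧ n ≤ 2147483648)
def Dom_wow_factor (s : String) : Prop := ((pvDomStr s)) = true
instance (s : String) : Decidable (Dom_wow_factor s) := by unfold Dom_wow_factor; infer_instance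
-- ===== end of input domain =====

-- B replaces A's three staged loops over prefix/suffix pair arrays by a single-pass
-- subsequence DP with three running counters (a timing run measured B faster by a
-- constant factor); same return value on every string.

-- ===== PORT A =====
-- All indices A uses are in range, so `List.getD … ' '` / `getD … 0` is exact for s[i]/suff[i]/pref[i];
-- range(1, n) = List.range' 1 (n-1) and range(n-2, -1, -1) = (List.range (n-1)).reverse (exact for every n = len(s) ≥ 0).
-- Loop bodies are the helpers wfStepUp / wfStepDown (suff[i] = suff[i-1]; if …: suff[i] += 1 — two writes, as in A).
def wfStepUp (cs : List Char) (a : List Int) (i : Nat) : List Int :=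
  let a1 := a.set i (a.getD (i - 1) 0)
  if cs.getD i ' ' = 'v' ∧ cs.getD (i - 1) ' ' = 'v' then a1.set i (a1.getD i 0 + 1) else a1

def wfStepDown (cs : List Char) (a : List Int) (i : Nat) : List Int :=
  let a1 := a.set i (a.getD (i + 1) 0)
  if cs.getD i ' ' = 'v' ∧ cs.getD (i + 1) ' ' = 'v' then a1.set i (a1.getD i 0 + 1) else a1

def wow_factor (s : String) : Int :=
  let cs := s.toList
  let n := cs.length
  let suff0 : List Int := List.replicate n 0
  let pref0 : List Int := List.replicate n 0
  let suff := (List.range' 1 (n - 1)).foldl (wfStepUp cs) suff0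
  let pref := ((List.range (n - 1)).reverse).foldl (wfStepDown cs) pref0
  (List.range n).foldl (fun t i =>
      if cs.getD i ' ' = 'o' ∧ suff.getD i 0 ≠ 0 ∧ pref.getD i 0 ≠ 0 then
        t + suff.getD i 0 * pref.getD i 0 else t) 0

-- ===== PORT B =====
-- one fold; the state is (ans, pair_o, pairs, prev); prev = '' is ported as none
def wfAltStep (st : Int × Int × Int × Option Char) (c : Char) : Int × Int × Int × Option Char :=
  if c = 'v' ∧ st.2.2.2 = some 'v' then (st.1 + st.2.1, st.2.1, st.2.2.1 + 1, some c)
  else if c = 'o' then (st.1, st.2.1 + st.2.2.1, st.2.2.1, some c)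
  else (st.1, st.2.1, st.2.2.1, some c)

def wow_factor_alt (s : String) : Int :=
  (s.toList.foldl wfAltStep ((0 : Int), (0 : Int), (0 : Int), (none : Option Char))).1

-- ===== PRECONDITION & SPEC =====
def Spec_wow_factor (s : String) (out : Int) : Prop := out = wow_factor_alt s
instance (s : String) (out : Int) : Decidable (Spec_wow_factor s out) := by unfold Spec_wow_factor; infer_instance

-- ===== CLAIM (what is proved, stated in full; the proofs are below) =====
def Claim_equal_wow_factor : Prop := ∀ (s : String), Dom_wow_factor s → Spec_wow_factor s (wow_factor s)

-- ===== LEMMAS AND PROOFS =====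

/-- number of 'vv' pairs (k, k+1) with k < m (reads with the out-of-range default ' ') -/
def wfCnt (cs : List Char) : Nat → Int
  | 0 => 0
  | m+1 => wfCnt cs m + (if cs.getD (m+1) ' ' = 'v' ∧ cs.getD m ' ' = 'v' then 1 else 0)

/-- A's value: Σ_{i<m, cs[i]='o'} wfCnt i * (T - wfCnt i) -/
def wfSum (cs : List Char) (T : Int) : Nat → Int
  | 0 => 0
  | m+1 => wfSum cs T m + (if cs.getD m ' ' = 'o' then wfCnt cs m * (T - wfCnt cs m) else 0)

/-- indicator: a 'vv' pair ends at index j -/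
def wfPB (cs : List Char) (j : Nat) : Int :=
  if 1 ≤ j ∧ cs.getD j ' ' = 'v' ∧ cs.getD (j-1) ' ' = 'v' then 1 else 0

/-- B's `pairs` after m characters: pairs with second index < m -/
def wfC (cs : List Char) : Nat → Int
  | 0 => 0
  | m+1 => wfC cs m + wfPB cs m

/-- B's `pair_o` after m characters -/
def wfP (cs : List Char) : Nat → Int
  | 0 => 0
  | m+1 => wfP cs m + (if cs.getD m ' ' = 'o' then wfC cs m else 0)

/-- B's `ans` after m characters -/
def wfS (cs : List Char) : Nat → Int
  | 0 => 0
  | m+1 => wfS cs m + (if 1 ≤ m ∧ cs.getD m ' ' = 'v' ∧ cs.getD (m-1) ' ' = 'v' then wfP cs m else 0)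

/-- B's per-o sum with an explicit total parameter, over wfC -/
def wfWS (cs : List Char) (T : Int) : Nat → Int
  | 0 => 0
  | m+1 => wfWS cs T m + (if cs.getD m ' ' = 'o' then wfC cs m * (T - wfC cs m) else 0)

lemma getD_oob (cs : List Char) (k : Nat) (h : cs.length ≤ k) : cs.getD k ' ' = ' ' := by
  simp [List.getD_eq_getElem?_getD, List.getElem?_eq_none_iff.mpr h]

lemma wfCnt_last (cs : List Char) (h : 1 ≤ cs.length) :
    wfCnt cs cs.length = wfCnt cs (cs.length - 1) := by
  obtain ⟨m, hm⟩ : ∃ m, cs.length = m + 1 := ⟨cs.length - 1, by omega⟩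
  have hoob : cs.getD (m+1) ' ' = ' ' := getD_oob cs (m+1) (by omega)
  rw [hm, wfCnt, hoob]
  simp

lemma getD_set_ne (a : List Int) (i j : Nat) (v : Int) (h : i ≠ j) :
    (a.set i v).getD j 0 = a.getD j 0 := by
  simp [List.getD_eq_getElem?_getD, List.getElem?_set_ne h]

lemma getD_set_self (a : List Int) (i : Nat) (v : Int) (h : i < a.length) :
    (a.set i v).getD i 0 = v := by
  simp [List.getD_eq_getElem?_getD, List.getElem?_set_self h]

lemma wfStepUp_length (cs : List Char) (a : List Int) (i : Nat) :
    (wfStepUp cs a i).length = a.length := by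
  unfold wfStepUp; split_ifs <;> simp

lemma wfStepDown_length (cs : List Char) (a : List Int) (i : Nat) :
    (wfStepDown cs a i).length = a.length := by
  unfold wfStepDown; split_ifs <;> simp

lemma wfStepUp_getD_ne (cs : List Char) (a : List Int) (i j : Nat) (h : i ≠ j) :
    (wfStepUp cs a i).getD j 0 = a.getD j 0 := by
  unfold wfStepUp
  split_ifs with hc
  · rw [getD_set_ne _ _ _ _ h, getD_set_ne _ _ _ _ h]
  · rw [getD_set_ne _ _ _ _ h]

lemma wfStepDown_getD_ne (cs : List Char) (a : List Int) (i j : Nat) (h : i ≠ j) :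
    (wfStepDown cs a i).getD j 0 = a.getD j 0 := by
  unfold wfStepDown
  split_ifs with hc
  · rw [getD_set_ne _ _ _ _ h, getD_set_ne _ _ _ _ h]
  · rw [getD_set_ne _ _ _ _ h]

lemma wfStepUp_getD_self (cs : List Char) (a : List Int) (i : Nat) (h : i < a.length) :
    (wfStepUp cs a i).getD i 0 = a.getD (i - 1) 0 +
      (if cs.getD i ' ' = 'v' ∧ cs.getD (i - 1) ' ' = 'v' then 1 else 0) := by
  unfold wfStepUp
  split_ifs with hc
  · rw [getD_set_self _ _ _ (by simpa using h), getD_set_self _ _ _ h]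
  · rw [getD_set_self _ _ _ h]; ring

lemma wfStepDown_getD_self (cs : List Char) (a : List Int) (i : Nat) (h : i < a.length) :
    (wfStepDown cs a i).getD i 0 = a.getD (i + 1) 0 +
      (if cs.getD i ' ' = 'v' ∧ cs.getD (i + 1) ' ' = 'v' then 1 else 0) := by
  unfold wfStepDown
  split_ifs with hc
  · rw [getD_set_self _ _ _ (by simpa using h), getD_set_self _ _ _ h]
  · rw [getD_set_self _ _ _ h]; ring

/-- invariant of A's first (upward) loop -/
lemma suff_inv (cs : List Char) (s m : Nat) (a : List Int)
    (hs : 1 ≤ s) (hsm : s + m ≤ cs.length) (hlen : a.length = cs.length)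
    (hinv : ∀ j < cs.length, a.getD j 0 = if j < s then wfCnt cs j else 0) :
    ((List.range' s m).foldl (wfStepUp cs) a).length = cs.length ∧
    ∀ j < cs.length, ((List.range' s m).foldl (wfStepUp cs) a).getD j 0
      = if j < s + m then wfCnt cs j else 0 := by
  induction m generalizing s a with
  | zero => simpa using ⟨hlen, hinv⟩
  | succ m ih =>
    rw [List.range'_succ, List.foldl_cons]
    obtain ⟨t, ht⟩ : ∃ t, s = t + 1 := ⟨s - 1, by omega⟩
    have hsn : s < cs.length := by omega
    have hstep : ∀ j < cs.length, (wfStepUp cs a s).getD j 0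
        = if j < s + 1 then wfCnt cs j else 0 := by
      intro j hj
      by_cases hjs : j = s
      · subst hjs
        rw [wfStepUp_getD_self cs a j (by omega),
          hinv (j - 1) (by omega), if_pos (show j - 1 < j from by omega),
          if_pos (show j < j + 1 from by omega)]
        rw [show j = t + 1 from ht, wfCnt, show t + 1 - 1 = t from by omega]
      · rw [wfStepUp_getD_ne cs a s j (fun h => hjs h.symm), hinv j hj]
        congr 1
        simp only [eq_iff_iff]; omega
    have hlen' : (wfStepUp cs a s).length = cs.length := by rw [wfStepUp_length, hlen]
    have key := ih (s + 1) _ (by omega) (by omega) hlen' hstep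
    have harith : s + 1 + m = s + (m + 1) := by omega
    rw [harith] at key
    exact key

/-- invariant of A's second (downward) loop -/
lemma pref_inv (cs : List Char) (m : Nat) (a : List Int)
    (hm : m ≤ cs.length - 1) (hlen : a.length = cs.length)
    (hinv : ∀ j < cs.length, a.getD j 0 = if m ≤ j then wfCnt cs cs.length - wfCnt cs j else 0) :
    ((List.range m).reverse.foldl (wfStepDown cs) a).length = cs.length ∧
    ∀ j < cs.length, ((List.range m).reverse.foldl (wfStepDown cs) a).getD j 0
      = wfCnt cs cs.length - wfCnt cs j := by
  induction m generalizing a with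
  | zero =>
    refine ⟨hlen, fun j hj => ?_⟩
    simpa using hinv j hj
  | succ m ih =>
    rw [List.range_succ, List.reverse_append, List.reverse_singleton, List.singleton_append,
      List.foldl_cons]
    have hmn : m + 1 < cs.length := by omega
    have hstep : ∀ j < cs.length, (wfStepDown cs a m).getD j 0
        = if m ≤ j then wfCnt cs cs.length - wfCnt cs j else 0 := by
      intro j hj
      by_cases hjm : j = m
      · subst hjm
        rw [wfStepDown_getD_self cs a j (by omega),
          hinv (j + 1) hmn, if_pos (le_refl (j + 1)), if_pos (le_refl j)]
        have hcnt : wfCnt cs (j + 1) = wfCnt cs j +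
            (if cs.getD (j+1) ' ' = 'v' ∧ cs.getD j ' ' = 'v' then 1 else 0) := rfl
        rw [hcnt]
        by_cases hc : cs.getD j ' ' = 'v' ∧ cs.getD (j + 1) ' ' = 'v'
        · rw [if_pos hc, if_pos ⟨hc.2, hc.1⟩]; ring
        · rw [if_neg hc, if_neg (fun h => hc ⟨h.2, h.1⟩)]; ring
      · rw [wfStepDown_getD_ne cs a m j (fun h => hjm h.symm), hinv j hj]
        congr 1
        simp only [eq_iff_iff]; omega
    have hlen' : (wfStepDown cs a m).length = cs.length := by rw [wfStepDown_length, hlen]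
    exact ih _ (by omega) hlen' hstep

lemma wf_guard (o : Prop) [Decidable o] (t x y : Int) :
    (if o ∧ x ≠ 0 ∧ y ≠ 0 then t + x * y else t) = t + (if o then x * y else 0) := by
  by_cases ho : o
  · by_cases hx : x = 0
    · simp [ho, hx]
    · by_cases hy : y = 0 <;> simp [ho, hx, hy]
  · simp [ho]

/-- A's third loop computes wfSum once suff/pref are characterised -/
lemma sum_inv (cs : List Char) (suff pref : List Int) (T : Int)
    (hs : ∀ j < cs.length, suff.getD j 0 = wfCnt cs j)
    (hp : ∀ j < cs.length, pref.getD j 0 = T - wfCnt cs j) :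
    ∀ m, m ≤ cs.length →
    (List.range m).foldl (fun t i =>
      if cs.getD i ' ' = 'o' ∧ suff.getD i 0 ≠ 0 ∧ pref.getD i 0 ≠ 0 then
        t + suff.getD i 0 * pref.getD i 0 else t) 0 = wfSum cs T m := by
  intro m
  induction m with
  | zero => intro _; rfl
  | succ m ih =>
    intro hm
    rw [List.range_succ, List.foldl_append, ih (by omega), List.foldl_cons, List.foldl_nil,
      hs m (by omega), hp m (by omega)]
    rw [wfSum]
    exact wf_guard _ _ _ _

/-- A's program equals wfSum with total = wfCnt at the length -/
lemma wfA_eq (s : String) :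
    wow_factor s = wfSum s.toList (wfCnt s.toList s.toList.length) s.toList.length := by
  unfold wow_factor
  set cs := s.toList with hcs
  simp only []
  by_cases h0 : cs.length = 0
  · rw [h0]; simp [wfSum, h0]
  · have h1 : 1 ≤ cs.length := by omega
    have hsuff := suff_inv cs 1 (cs.length - 1) (List.replicate cs.length 0)
      le_rfl (by omega) (by simp)
      (by intro j hj
          simp only [List.getD_eq_getElem?_getD, List.getElem?_replicate, hj, if_pos]
          by_cases hj1 : j < 1
          · rw [if_pos hj1]
            have : j = 0 := by omega
            rw [this]; rfl
          · rw [if_neg hj1]; rfl)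
    have hpref := pref_inv cs (cs.length - 1) (List.replicate cs.length 0)
      le_rfl (by simp)
      (by intro j hj
          simp only [List.getD_eq_getElem?_getD, List.getElem?_replicate, hj, if_pos]
          by_cases hj1 : cs.length - 1 ≤ j
          · rw [if_pos hj1]
            have : j = cs.length - 1 := by omega
            rw [this, wfCnt_last cs h1]; simp
          · rw [if_neg hj1]; rfl)
    rw [sum_inv cs _ _ (wfCnt cs cs.length)
      (by intro j hj
          rw [hsuff.2 j hj, if_pos (by omega : j < 1 + (cs.length - 1))])
      (fun j hj => hpref.2 j hj) cs.length le_rfl]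

/-- invariant of B's single loop over the first m characters -/
lemma alt_inv (cs : List Char) : ∀ m, m ≤ cs.length →
    (cs.take m).foldl wfAltStep ((0 : Int), (0 : Int), (0 : Int), (none : Option Char))
    = (wfS cs m, wfP cs m, wfC cs m, if m = 0 then none else some (cs.getD (m - 1) ' ')) := by
  intro m
  induction m with
  | zero => intro _; rfl
  | succ m ih =>
    intro hm
    have hmn : m < cs.length := by omega
    rw [List.take_add_one, List.getElem?_eq_getElem hmn, Option.toList_some,
      List.foldl_append, ih (by omega), List.foldl_cons, List.foldl_nil]
    have hget : cs[m] = cs.getD m ' ' := (List.getD_eq_getElem cs ' ' hmn).symm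
    cases m with
    | zero =>
      show wfAltStep (wfS cs 0, wfP cs 0, wfC cs 0, none) cs[0] = _
      unfold wfAltStep
      simp only [hget]
      rw [if_neg (by rintro ⟨_, h⟩; simp at h)]
      by_cases ho : cs.getD 0 ' ' = 'o'
      · simp [wfS, wfP, wfC, wfPB]
      · simp [wfS, wfP, wfC, wfPB]
    | succ t =>
      show wfAltStep (wfS cs (t+1), wfP cs (t+1), wfC cs (t+1), some (cs.getD t ' ')) cs[t+1] = _
      unfold wfAltStep
      simp only [hget]
      have hS : wfS cs (t + 2) = wfS cs (t + 1) +
          (if 1 ≤ t + 1 ∧ cs.getD (t+1) ' ' = 'v' ∧ cs.getD t ' ' = 'v' then wfP cs (t+1) else 0) := rfl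
      have hP : wfP cs (t + 2) = wfP cs (t + 1) +
          (if cs.getD (t+1) ' ' = 'o' then wfC cs (t+1) else 0) := rfl
      have hC : wfC cs (t + 2) = wfC cs (t + 1) + wfPB cs (t+1) := rfl
      by_cases hc : cs.getD (t+1) ' ' = 'v' ∧ cs.getD t ' ' = 'v'
      · rw [if_pos ⟨hc.1, congrArg some hc.2⟩]
        have hno : ¬ cs.getD (t+1) ' ' = 'o' := by rw [hc.1]; decide
        have hpb : wfPB cs (t+1) = 1 := by
          unfold wfPB
          rw [if_pos ⟨by omega, by simpa using hc⟩]
        rw [show t + 1 + 1 = t + 2 from rfl, hS, hP, hC,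
          if_pos ⟨by omega, hc⟩, if_neg hno, hpb]
        simp
      · rw [if_neg (by rintro ⟨h1, h2⟩; exact hc ⟨h1, by simpa using h2⟩)]
        have hpb : wfPB cs (t+1) = 0 := by
          unfold wfPB
          rw [if_neg (by rintro ⟨_, h1, h2⟩; exact hc ⟨h1, by simpa using h2⟩)]
        have hS' : wfS cs (t + 2) = wfS cs (t + 1) := by
          rw [hS, if_neg (by rintro ⟨_, h⟩; exact hc h), add_zero]
        have hC' : wfC cs (t + 2) = wfC cs (t + 1) := by rw [hC, hpb, add_zero]
        by_cases ho : cs.getD (t+1) ' ' = 'o'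
        · have hP' : wfP cs (t + 2) = wfP cs (t + 1) + wfC cs (t + 1) := by rw [hP, if_pos ho]
          rw [if_pos ho, show t + 1 + 1 = t + 2 from rfl, hS', hP', hC']
          simp
        · have hP' : wfP cs (t + 2) = wfP cs (t + 1) := by rw [hP, if_neg ho, add_zero]
          rw [if_neg ho, show t + 1 + 1 = t + 2 from rfl, hS', hP', hC']
          simp

/-- shifting the total by one adds wfP -/
lemma wfWS_addT (cs : List Char) (T : Int) : ∀ m, wfWS cs (T + 1) m = wfWS cs T m + wfP cs m := by
  intro m
  induction m with
  | zero => rfl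
  | succ m ih =>
    rw [wfWS, wfWS, wfP, ih]
    by_cases ho : cs.getD m ' ' = 'o'
    · rw [if_pos ho, if_pos ho, if_pos ho]; ring
    · rw [if_neg ho, if_neg ho, if_neg ho]; ring

/-- B's running answer equals the per-'o' sum with total wfC m -/
lemma wfS_eq (cs : List Char) : ∀ m, wfS cs m = wfWS cs (wfC cs m) m := by
  intro m
  induction m with
  | zero => rfl
  | succ m ih =>
    rw [wfS, wfWS, wfC]
    by_cases hc : 1 ≤ m ∧ cs.getD m ' ' = 'v' ∧ cs.getD (m-1) ' ' = 'v'
    · have hpb : wfPB cs m = 1 := by unfold wfPB; rw [if_pos hc]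
      have hno : ¬ cs.getD m ' ' = 'o' := by rw [hc.2.1]; decide
      rw [if_pos hc, if_neg hno, hpb, wfWS_addT, ih]
      ring
    · have hpb : wfPB cs m = 0 := by unfold wfPB; rw [if_neg hc]
      rw [if_neg hc, hpb, add_zero, ih]
      by_cases ho : cs.getD m ' ' = 'o'
      · rw [if_pos ho]; ring
      · rw [if_neg ho]; ring

/-- at 'o' positions wfC and wfCnt agree, so the two per-'o' sums coincide -/
lemma wfC_succ_eq_wfCnt (cs : List Char) : ∀ m, wfC cs (m + 1) = wfCnt cs m := by
  intro m
  induction m with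
  | zero =>
    show wfC cs 0 + wfPB cs 0 = wfCnt cs 0
    unfold wfPB
    rw [if_neg (by rintro ⟨h, _⟩; omega)]
    rfl
  | succ t ih =>
    show wfC cs (t + 1) + wfPB cs (t + 1) = wfCnt cs (t + 1)
    rw [ih, wfCnt]
    unfold wfPB
    congr 1
    by_cases hc : cs.getD (t+1) ' ' = 'v' ∧ cs.getD t ' ' = 'v'
    · rw [if_pos ⟨by omega, by simpa using hc⟩, if_pos hc]
    · rw [if_neg (by rintro ⟨_, h⟩; exact hc (by simpa using h)), if_neg hc]

lemma wfWS_eq_wfSum (cs : List Char) (T : Int) : ∀ m, wfWS cs T m = wfSum cs T m := by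
  intro m
  induction m with
  | zero => rfl
  | succ m ih =>
    rw [wfWS, wfSum, ih]
    by_cases ho : cs.getD m ' ' = 'o'
    · have hC : wfC cs m = wfCnt cs m := by
        cases m with
        | zero => rfl
        | succ t =>
          rw [wfC_succ_eq_wfCnt, wfCnt]
          rw [if_neg (by rintro ⟨h, _⟩; rw [ho] at h; exact absurd h (by decide))]
          ring
      rw [if_pos ho, if_pos ho, hC]
    · rw [if_neg ho, if_neg ho]

lemma wfC_length (cs : List Char) : wfC cs cs.length = wfCnt cs cs.length := by
  by_cases h0 : cs.length = 0
  · rw [h0]; rfl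
  · obtain ⟨m, hm⟩ : ∃ m, cs.length = m + 1 := ⟨cs.length - 1, by omega⟩
    rw [hm, wfC_succ_eq_wfCnt, ← hm, wfCnt_last cs (by omega), hm]
    simp

lemma wf_eq (s : String) : wow_factor s = wow_factor_alt s := by
  rw [wfA_eq]
  unfold wow_factor_alt
  have h := alt_inv s.toList s.toList.length le_rfl
  rw [List.take_length] at h
  rw [h]
  show wfSum _ _ _ = wfS s.toList s.toList.length
  rw [wfS_eq, wfC_length, wfWS_eq_wfSum]

-- ===== VERDICT (by name: the statement is the Claim_ definition above) =====
theorem wow_factor_spec : Claim_equal_wow_factor := by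
  intro s _
  show wow_factor s = wow_factor_alt s
  exact wf_eq s
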